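-- pv_equiv track=rewrite | github.com/piScope/piScope | python/ifigure/extra/connections.py | r_check_finish
-- ===== SOURCE A (Python) =====
-- def r_check_finish(st, pos, et, rt):
--     v = False
--     if st in pos:
--         rt.append(st)
--         if st in et:
--             return True
--         pos.remove(st)
--         if st[1] % 2 == 1:
--             if r_check_finish((st[0]+2, st[1]), pos[:], et, rt):
--                 v = True
--             if r_check_finish((st[0]-2, st[1]), pos[:], et, rt):
--                 v = True
--         else:
--             if r_check_finish((st[0],   st[1]+2), pos[:], et, rt):
--                 v = True
--             if r_check_finish((st[0],   st[1]-2), pos[:], et, rt):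
--                 v = True
--         if r_check_finish((st[0]+1,   st[1]+1), pos[:], et, rt):
--             v = True
--         if r_check_finish((st[0]-1,   st[1]+1), pos[:], et, rt):
--             v = True
--         if r_check_finish((st[0]+1,   st[1]-1), pos[:], et, rt):
--             v = True
--         if r_check_finish((st[0]-1,   st[1]-1), pos[:], et, rt):
--             v = True
--     return v
-- ===== SOURCE B (Python) =====
-- def r_check_finish(st, pos, et, rt):
--     reached = False
--     stack = [(st, pos)]
--     while stack:
--         c, cells = stack.pop()
--         if c not in cells:
--             continue
--         rt.append(c)
--         if c in et:
--             reached = True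
--             continue
--         cells.remove(c)
--         x, y = c
--         if y % 2 == 1:
--             neighs = [(x + 2, y), (x - 2, y)]
--         else:
--             neighs = [(x, y + 2), (x, y - 2)]
--         neighs += [(x + 1, y + 1), (x - 1, y + 1), (x + 1, y - 1), (x - 1, y - 1)]
--         for n in reversed(neighs):
--             stack.append((n, cells.copy()))
--     return reached
-- ===== Notes on version B (the rewrite author's own statement) =====
-- stated objective: alternative
-- what changed: Replaces the eight-way recursive DFS with an explicit worklist-stack loop: frames (cell, remaining-cells) are popped, the reachable flag is OR-accumulated, and the six neighbour frames are pushed in reverse so the pre-order trace in rt and the pos mutation are identical.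
import Mathlib
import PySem

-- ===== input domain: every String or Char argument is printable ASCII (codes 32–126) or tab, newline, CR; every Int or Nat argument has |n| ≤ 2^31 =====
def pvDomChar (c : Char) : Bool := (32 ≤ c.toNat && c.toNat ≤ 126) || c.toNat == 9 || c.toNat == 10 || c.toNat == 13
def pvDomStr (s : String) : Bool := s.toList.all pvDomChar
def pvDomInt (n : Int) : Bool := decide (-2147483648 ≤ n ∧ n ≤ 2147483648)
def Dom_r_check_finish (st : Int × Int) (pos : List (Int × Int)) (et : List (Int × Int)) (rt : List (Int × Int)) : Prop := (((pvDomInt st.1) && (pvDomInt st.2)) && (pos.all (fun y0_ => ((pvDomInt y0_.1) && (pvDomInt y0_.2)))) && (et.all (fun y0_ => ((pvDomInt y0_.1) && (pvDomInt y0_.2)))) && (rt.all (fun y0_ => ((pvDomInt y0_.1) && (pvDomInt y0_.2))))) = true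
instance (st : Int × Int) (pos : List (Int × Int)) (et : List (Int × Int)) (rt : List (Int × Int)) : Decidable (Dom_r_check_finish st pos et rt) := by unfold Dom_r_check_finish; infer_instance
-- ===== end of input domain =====

-- B replaces A's eight-way recursive DFS by an explicit worklist-stack loop (different
-- decomposition, same cost); both Pythons mutate pos (root removal) and rt (identical pre-order
-- trace) — the theorem below is about the RETURN value.

-- ===== PORT A =====
-- Literal transliteration of Source A's recursion. The Nat fuel is ONLY a structural totality
-- guard: each recursive call shrinks pos by one, so fuel = pos.length + 1 never runs out
-- (the fuel-0 branch is unreachable; rcfGo_fuel below proves fuel-irrelevance).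
-- rt.append is a pure side effect with no bearing on the return value, so rt is passed through.
def rcfGo (et : List (Int × Int)) (rt : List (Int × Int)) : Nat → (Int × Int) → List (Int × Int) → Bool
  | 0, _, _ => false
  | fuel + 1, st, pos =>
    if st ∈ pos then
      if st ∈ et then true
      else
        let pos' := pos.erase st
        let v := false
        let v :=
          if PySem.Int.mod st.2 2 = 1 then
            let v := if rcfGo et rt fuel (st.1 + 2, st.2) pos' then true else v
            let v := if rcfGo et rt fuel (st.1 - 2, st.2) pos' then true else v
            v
          else
            let v := if rcfGo et rt fuel (st.1, st.2 + 2) pos' then true else v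
            let v := if rcfGo et rt fuel (st.1, st.2 - 2) pos' then true else v
            v
        let v := if rcfGo et rt fuel (st.1 + 1, st.2 + 1) pos' then true else v
        let v := if rcfGo et rt fuel (st.1 - 1, st.2 + 1) pos' then true else v
        let v := if rcfGo et rt fuel (st.1 + 1, st.2 - 1) pos' then true else v
        let v := if rcfGo et rt fuel (st.1 - 1, st.2 - 1) pos' then true else v
        v
    else false

def r_check_finish (st : Int × Int) (pos : List (Int × Int)) (et : List (Int × Int)) (rt : List (Int × Int)) : Bool :=
  rcfGo et rt (pos.length + 1) st pos

-- ===== PORT B =====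
-- neighbour list of a cell (parity of y chooses the first two), as built in Source B
def pvNeighs (c : Int × Int) : List (Int × Int) :=
  (if PySem.Int.mod c.2 2 = 1 then [(c.1 + 2, c.2), (c.1 - 2, c.2)]
   else [(c.1, c.2 + 2), (c.1, c.2 - 2)]) ++
  [(c.1 + 1, c.2 + 1), (c.1 - 1, c.2 + 1), (c.1 + 1, c.2 - 1), (c.1 - 1, c.2 - 1)]

-- the while-loop of Source B: pop a frame, possibly set the flag or push the six children
-- (Source B pushes them reversed onto a LIFO stack; the head of this list is the next pop, so
-- consing the children in order is exactly that). The Nat fuel is ONLY a totality guard: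
-- the measure Σ 7^len(frame) strictly drops each iteration, so fuel = 7^len(pos) never runs
-- out (the fuel-0 branch is unreachable; runStackGo_eq below proves it).
def runStackGo (et : List (Int × Int)) : Nat → List ((Int × Int) × List (Int × Int)) → Bool → Bool
  | _, [], reached => reached
  | 0, _ :: _, reached => reached
  | fuel + 1, (c, cells) :: rest, reached =>
    if c ∈ cells then
      if c ∈ et then runStackGo et fuel rest true
      else
        let cells' := cells.erase c
        runStackGo et fuel ((pvNeighs c).map (fun n => (n, cells')) ++ rest) reached
    else runStackGo et fuel rest reached

def r_check_finish_alt (st : Int × Int) (pos : List (Int × Int)) (et : List (Int × Int)) (rt : List (Int × Int)) : Bool :=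
  runStackGo et (7 ^ pos.length) [(st, pos)] false

-- ===== PRECONDITION & SPEC =====
def Spec_r_check_finish (st : Int × Int) (pos : List (Int × Int)) (et : List (Int × Int)) (rt : List (Int × Int)) (out : Bool) : Prop := out = r_check_finish_alt st pos et rt
instance (st : Int × Int) (pos : List (Int × Int)) (et : List (Int × Int)) (rt : List (Int × Int)) (out : Bool) : Decidable (Spec_r_check_finish st pos et rt out) := by unfold Spec_r_check_finish; infer_instance

-- ===== CLAIM (what is proved, stated in full; the proofs are below) =====
def Claim_equal_r_check_finish : Prop := ∀ (st : Int × Int) (pos : List (Int × Int)) (et : List (Int × Int)) (rt : List (Int × Int)), Dom_r_check_finish st pos et rt → Spec_r_check_finish st pos et rt (r_check_finish st pos et rt)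

-- ===== LEMMAS AND PROOFS =====

-- (if b then true else v) is b || v
lemma pv_if_or (a v : Bool) : (if a then true else v) = (a || v) := by cases a <;> rfl

-- the fuel of rcfGo is irrelevant as long as it exceeds pos.length
lemma rcfGo_fuel (et rt : List (Int × Int)) :
    ∀ (f1 f2 : Nat) (st : Int × Int) (pos : List (Int × Int)),
      pos.length < f1 → pos.length < f2 →
      rcfGo et rt f1 st pos = rcfGo et rt f2 st pos := by
  intro f1
  induction f1 with
  | zero => intro f2 st pos h1; exact absurd h1 (by omega)
  | succ f1 ih =>
    intro f2 st pos h1 h2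
    match f2, h2 with
    | f2 + 1, _ =>
      show rcfGo et rt (f1 + 1) st pos = rcfGo et rt (f2 + 1) st pos
      rw [rcfGo, rcfGo]
      by_cases hm : st ∈ pos
      · simp only [hm, if_true]
        by_cases he : st ∈ et
        · simp [he]
        · have hl : (pos.erase st).length < f1 := by
            rw [List.length_erase_of_mem hm]
            have := List.length_pos_of_mem hm
            omega
          have hl2 : (pos.erase st).length < f2 := by
            rw [List.length_erase_of_mem hm]
            have := List.length_pos_of_mem hm
            omega
          simp only [he, if_false,
            ih f2 _ (pos.erase st) hl hl2]
      · simp [hm]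

-- unfolding A once on an expanded node: the chain of flag updates is the OR over the six
-- children, each with its own exact fuel
lemma rcfGo_expand (et rt : List (Int × Int)) (st : Int × Int) (pos : List (Int × Int))
    (h : st ∈ pos) (hne : st ∉ et) :
    rcfGo et rt (pos.length + 1) st pos
      = (pvNeighs st).any (fun n => rcfGo et rt ((pos.erase st).length + 1) n (pos.erase st)) := by
  have hfe : ∀ n : Int × Int,
      rcfGo et rt pos.length n (pos.erase st)
        = rcfGo et rt ((pos.erase st).length + 1) n (pos.erase st) := by
    intro n
    have hp := List.length_pos_of_mem h
    exact rcfGo_fuel et rt _ _ n _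
      (by rw [List.length_erase_of_mem h]; omega)
      (by omega)
  rw [rcfGo, if_pos h, if_neg hne]
  by_cases hp : PySem.Int.mod st.2 2 = 1 <;>
    simp only [hp, if_true, if_false, pv_if_or, pvNeighs, List.any_append, List.any_cons,
      List.any_nil, Bool.false_or, Bool.or_assoc, Bool.or_comm, Bool.or_left_comm, hfe]

-- the frame measure that bounds the number of loop iterations
def pvMeasure (stack : List ((Int × Int) × List (Int × Int))) : Nat :=
  (stack.map (fun f => 7 ^ f.2.length)).sum

-- the stack loop computes the OR of A over every pending frame (given enough fuel)
lemma runStackGo_eq (et rt : List (Int × Int)) :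
    ∀ (fuel : Nat) (stack : List ((Int × Int) × List (Int × Int))) (acc : Bool),
      pvMeasure stack ≤ fuel →
      runStackGo et fuel stack acc
        = (acc || stack.any (fun f => rcfGo et rt (f.2.length + 1) f.1 f.2)) := by
  intro fuel
  induction fuel with
  | zero =>
    intro stack acc hm
    match stack with
    | [] => simp [runStackGo]
    | (c, cells) :: rest =>
      exfalso
      have : 0 < 7 ^ cells.length := pow_pos (by norm_num) _
      simp only [pvMeasure, List.map_cons, List.sum_cons] at hm
      omega
  | succ fuel ih =>
    intro stack acc hm
    match stack with
    | [] => simp [runStackGo]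
    | (c, cells) :: rest =>
      have hrest : pvMeasure rest ≤ fuel := by
        have : 0 < 7 ^ cells.length := pow_pos (by norm_num) _
        simp only [pvMeasure, List.map_cons, List.sum_cons] at hm ⊢
        omega
      rw [runStackGo]
      by_cases hc : c ∈ cells
      · by_cases he : c ∈ et
        · have hv : rcfGo et rt (cells.length + 1) c cells = true := by
            rw [rcfGo]; simp [hc, he]
          simp only [hc, he, if_true, ih rest true hrest, List.any_cons, hv]
          simp
        · have hlen := List.length_pos_of_mem hc
          have h7 : (7:ℕ) ^ cells.length = 7 * 7 ^ (cells.erase c).length := by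
            rw [List.length_erase_of_mem hc]
            conv_lhs => rw [show cells.length = (cells.length - 1) + 1 from by omega]
            rw [pow_succ']
          have hchild : pvMeasure ((pvNeighs c).map (fun n => (n, cells.erase c)) ++ rest) ≤ fuel := by
            have hrep : ((pvNeighs c).map (fun n => (n, cells.erase c))).map
                (fun f => 7 ^ f.2.length) = List.replicate 6 (7 ^ (cells.erase c).length) := by
              simp only [pvNeighs]; split <;> rfl
            have hpos : 0 < 7 ^ (cells.erase c).length := pow_pos (by norm_num) _
            simp only [pvMeasure, List.map_append, List.sum_append, hrep, List.sum_replicate,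
              smul_eq_mul, List.map_cons, List.sum_cons] at hm ⊢
            omega
          simp only [hc, he, if_true, if_false, ih _ acc hchild, List.any_append, List.any_map,
            List.any_cons, Function.comp_def, rcfGo_expand et rt c cells hc he]
      · have hv : rcfGo et rt (cells.length + 1) c cells = false := by
          rw [rcfGo]; simp [hc]
        simp only [hc, if_false, ih rest acc hrest, List.any_cons, hv]
        simp

-- ===== VERDICT (by name: the statement is the Claim_ definition above) =====
theorem r_check_finish_spec : Claim_equal_r_check_finish := by
  intro st pos et rt _
  unfold Spec_r_check_finish r_check_finish_alt r_check_finish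
  rw [runStackGo_eq et rt (7 ^ pos.length) [(st, pos)] false
    (by simp [pvMeasure])]
  simp
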